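-- pv_equiv track=rewrite | github.com/cwatson1998/scenario-verification | compiler/util.py | splice_string_all
-- ===== SOURCE A (Python) =====
-- def splice_string_all(base_string, substring, addition, after=True):
--     ''' Splice in for all occurrences. '''
--     if len(substring.strip()) == 0:
--         raise ValueError("Cannot splice on a whitespace pattern.")
--     components = list(base_string.split(substring))
--     if after:
--         splice = substring + addition
--     else:
--         splice = addition + substring
--     new_string = components[0]
--     for c in components[1:]:
--         new_string += splice + c
--     # new_string += components[-1]
--     return new_string
-- ===== SOURCE B (Python) =====
-- def splice_string_all(base_string, substring, addition, after=True):
--     ''' Splice in for all occurrences. '''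
--     if len(substring.strip()) == 0:
--         raise ValueError("Cannot splice on a whitespace pattern.")
--     splice = substring + addition if after else addition + substring
--     parts = []
--     rem = base_string
--     while True:
--         j = rem.find(substring)
--         if j == -1:
--             parts.append(rem)
--             break
--         parts.append(rem[:j])
--         parts.append(splice)
--         rem = rem[j + len(substring):]
--     return ''.join(parts)
-- ===== Notes on version B (the rewrite author's own statement) =====
-- stated objective: alternative
-- what changed: B replaces A's split(substring)-then-concatenate loop by a single cursor scan with str.find that emits prefix and splice pieces into a list joined once at the end.
import Mathlib
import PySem

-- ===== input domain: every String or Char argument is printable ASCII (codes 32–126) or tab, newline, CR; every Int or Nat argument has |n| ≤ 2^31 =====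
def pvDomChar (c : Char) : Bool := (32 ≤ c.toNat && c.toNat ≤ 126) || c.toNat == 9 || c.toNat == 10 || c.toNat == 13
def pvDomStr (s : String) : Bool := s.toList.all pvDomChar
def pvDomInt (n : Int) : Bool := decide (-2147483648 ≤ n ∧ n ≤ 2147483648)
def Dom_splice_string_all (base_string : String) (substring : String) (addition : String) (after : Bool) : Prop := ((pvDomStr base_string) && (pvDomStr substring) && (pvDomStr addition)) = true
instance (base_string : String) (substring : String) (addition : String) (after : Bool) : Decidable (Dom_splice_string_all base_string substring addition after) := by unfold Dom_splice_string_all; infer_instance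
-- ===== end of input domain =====

-- B replaces A's split-into-components-then-concatenate loop by a single find-driven cursor scan
-- that emits prefix+splice pieces and joins them (objective: alternative decomposition, same cost).
-- A raises ValueError when the substring strips to empty (whitespace-only pattern); Pre_ excludes exactly those inputs.


-- ===== PORT A =====
-- A on code points: whitespace guard, split on the substring, then concatenate
-- components[0] and 'splice + c' for each later component.
def pvSpliceA (base sub add : List Char) (after : Bool) : List Char :=
  if PySem.Chars.len (PySem.Chars.strip sub) = 0 then []  -- A raises ValueError here (outside Pre_)
  else
    match PySem.Chars.split? base sub with
    | none => []  -- unreachable: sub ≠ [] under Pre_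
    | some components =>
      let splice := if after then sub ++ add else add ++ sub
      match components with
      | [] => []  -- unreachable: split never returns an empty list
      | c0 :: rest => rest.foldl (fun acc c => acc ++ (splice ++ c)) c0

def splice_string_all (base_string : String) (substring : String) (addition : String) (after : Bool) : String :=
  String.ofList (pvSpliceA base_string.toList substring.toList addition.toList after)

-- ===== PORT B =====
-- B's cursor scan: find the next occurrence in the remainder; emit the prefix and the
-- splice, continue after the occurrence; when find returns -1 emit the remainder; join.
def pvSpliceBGo (sub splice : List Char) (hsub : sub ≠ []) (rem : List Char) : List (List Char) :=
  let j := PySem.Chars.find rem sub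
  if h : j = -1 then [rem]
  else
    rem.take j.toNat :: splice ::
      pvSpliceBGo sub splice hsub (rem.drop (j.toNat + sub.length))
termination_by rem.length
decreasing_by
  have hinf : sub <:+: rem := by
    by_contra hc
    exact h (by simpa [j] using (PySem.Chars.find_eq_neg_one_iff rem sub).mpr hc)
  have h1 : 0 < sub.length := List.length_pos_iff.mpr hsub
  have h2 : sub.length ≤ rem.length := hinf.length_le
  simp only [List.length_drop]
  omega

def pvSpliceB (base sub add : List Char) (after : Bool) : List Char :=
  if h : PySem.Chars.len (PySem.Chars.strip sub) = 0 then []  -- B raises ValueError here (outside Pre_)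
  else
    let splice := if after then sub ++ add else add ++ sub
    have hsub : sub ≠ [] := by
      intro hnil; exact h (by simp [hnil, PySem.Chars.strip, PySem.Chars.lstrip, PySem.Chars.rstrip, PySem.Chars.len])
    PySem.Chars.join [] (pvSpliceBGo sub splice hsub base)

def splice_string_all_alt (base_string : String) (substring : String) (addition : String) (after : Bool) : String :=
  String.ofList (pvSpliceB base_string.toList substring.toList addition.toList after)

-- ===== PRECONDITION & SPEC =====
-- Pre_ excludes exactly the inputs where A raises ValueError: a substring that is empty
-- or consists only of whitespace.
def Pre_splice_string_all (base_string : String) (substring : String) (addition : String) (after : Bool) : Prop :=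
  PySem.Chars.len (PySem.Chars.strip substring.toList) ≠ 0
instance (base_string : String) (substring : String) (addition : String) (after : Bool) : Decidable (Pre_splice_string_all base_string substring addition after) := by unfold Pre_splice_string_all; infer_instance

def pvWitness_splice_string_all : String × String × String × Bool := ("abcabd", "ab", "X", true)

def Spec_splice_string_all (base_string : String) (substring : String) (addition : String) (after : Bool) (out : String) : Prop := out = splice_string_all_alt base_string substring addition after
instance (base_string : String) (substring : String) (addition : String) (after : Bool) (out : String) : Decidable (Spec_splice_string_all base_string substring addition after out) := by unfold Spec_splice_string_all; infer_instance

-- ===== CLAIM (what is proved, stated in full; the proofs are below) =====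
def Claim_equal_splice_string_all : Prop := ∀ (base_string : String) (substring : String) (addition : String) (after : Bool), Dom_splice_string_all base_string substring addition after → Pre_splice_string_all base_string substring addition after → Spec_splice_string_all base_string substring addition after (splice_string_all base_string substring addition after)

-- ===== LEMMAS AND PROOFS =====

def pvMapFirst (p : List Char) : List (List Char) → List (List Char)
  | [] => []
  | x :: xs => (p ++ x) :: xs

theorem pvMapFirst_nil_pre (xs : List (List Char)) : pvMapFirst [] xs = xs := by
  cases xs <;> simp [pvMapFirst]

theorem pvMapFirst_comp (p q : List Char) (xs : List (List Char)) :
    pvMapFirst p (pvMapFirst q xs) = pvMapFirst (p ++ q) xs := by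
  cases xs <;> simp [pvMapFirst]

theorem pvSplitOn_go_spec (sep : List Char) (hsep : sep ≠ []) :
    ∀ n l, l.length ≤ n → ∀ fuel, l.length < fuel → ∀ (cur : List Char) (acc : List (List Char)),
      PySem.Chars.splitOn.go sep fuel l cur acc
        = acc.reverse ++ pvMapFirst cur.reverse (PySem.Chars.splitOn l sep) := by
  intro n
  induction n with
  | zero =>
    intro l hl fuel hf cur acc
    have : l = [] := List.length_eq_zero_iff.mp (Nat.le_zero.mp hl)
    subst this
    obtain ⟨f, rfl⟩ : ∃ f, fuel = f + 1 := ⟨fuel - 1, by omega⟩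
    simp [PySem.Chars.splitOn.go, PySem.Chars.splitOn, pvMapFirst]
  | succ n ih =>
    intro l hl fuel hf cur acc
    obtain ⟨f, rfl⟩ : ∃ f, fuel = f + 1 := ⟨fuel - 1, by omega⟩
    match l with
    | [] =>
      simp [PySem.Chars.splitOn.go, PySem.Chars.splitOn, pvMapFirst]
    | c :: rest =>
      rw [show PySem.Chars.splitOn.go sep (f+1) (c :: rest) cur acc =
          (if sep.isPrefixOf (c :: rest) then
            PySem.Chars.splitOn.go sep f (List.drop sep.length (c :: rest)) [] (cur.reverse :: acc)
          else PySem.Chars.splitOn.go sep f rest (c :: cur) acc) from rfl]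
      have hsl : 0 < sep.length := List.length_pos_iff.mpr hsep
      by_cases hpre : sep.isPrefixOf (c :: rest)
      · simp only [hpre, if_true]
        have hdl : (List.drop sep.length (c :: rest)).length ≤ n := by
          simp [List.length_drop]; simp at hl; omega
        rw [ih _ hdl f (by simp [List.length_drop] at hdl ⊢; simp at hl hf; omega) [] (cur.reverse :: acc)]
        -- RHS: splitOn (c::rest) sep = [] :: splitOn (drop ...) sep
        have hR : PySem.Chars.splitOn (c :: rest) sep
            = [] :: PySem.Chars.splitOn (List.drop sep.length (c :: rest)) sep := by
          rw [show PySem.Chars.splitOn (c :: rest) sep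
              = PySem.Chars.splitOn.go sep ((c :: rest).length + 1) (c :: rest) [] [] from rfl]
          rw [show PySem.Chars.splitOn.go sep ((c :: rest).length + 1) (c :: rest) [] [] =
              (if sep.isPrefixOf (c :: rest) then
                PySem.Chars.splitOn.go sep ((c :: rest).length) (List.drop sep.length (c :: rest)) [] ([].reverse :: [])
              else PySem.Chars.splitOn.go sep ((c :: rest).length) rest (c :: []) []) from rfl]
          simp only [hpre, if_true]
          rw [ih _ hdl ((c :: rest).length) (by simp [List.length_drop]; omega) [] _]
          simp [pvMapFirst_nil_pre]
        rw [hR]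
        simp only [pvMapFirst]
        cases PySem.Chars.splitOn (List.drop sep.length (c :: rest)) sep <;> simp
      · simp only [hpre, if_false, Bool.false_eq_true]
        have hrl : rest.length ≤ n := by simp at hl; omega
        rw [ih _ hrl f (by simp at hf; omega) (c :: cur) acc]
        have hR : PySem.Chars.splitOn (c :: rest) sep
            = pvMapFirst [c] (PySem.Chars.splitOn rest sep) := by
          rw [show PySem.Chars.splitOn (c :: rest) sep
              = PySem.Chars.splitOn.go sep ((c :: rest).length + 1) (c :: rest) [] [] from rfl]
          rw [show PySem.Chars.splitOn.go sep ((c :: rest).length + 1) (c :: rest) [] [] =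
              (if sep.isPrefixOf (c :: rest) then
                PySem.Chars.splitOn.go sep ((c :: rest).length) (List.drop sep.length (c :: rest)) [] ([].reverse :: [])
              else PySem.Chars.splitOn.go sep ((c :: rest).length) rest (c :: []) []) from rfl]
          simp only [hpre, if_false, Bool.false_eq_true]
          rw [ih _ hrl ((c :: rest).length) (by simp) (c :: []) []]
          simp
        rw [hR, pvMapFirst_comp]
        simp

theorem pvSplitOn_nil (sep : List Char) (hsep : sep ≠ []) :
    PySem.Chars.splitOn [] sep = [[]] := by
  simp [PySem.Chars.splitOn, PySem.Chars.splitOn.go]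

theorem pvSplitOn_cons_prefix (sep : List Char) (hsep : sep ≠ []) (c : Char) (rest : List Char)
    (hpre : sep.isPrefixOf (c :: rest) = true) :
    PySem.Chars.splitOn (c :: rest) sep = [] :: PySem.Chars.splitOn ((c :: rest).drop sep.length) sep := by
  rw [show PySem.Chars.splitOn (c :: rest) sep
      = PySem.Chars.splitOn.go sep ((c :: rest).length + 1) (c :: rest) [] [] from rfl]
  rw [show PySem.Chars.splitOn.go sep ((c :: rest).length + 1) (c :: rest) [] [] =
      (if sep.isPrefixOf (c :: rest) then
        PySem.Chars.splitOn.go sep ((c :: rest).length) (List.drop sep.length (c :: rest)) [] ([].reverse :: [])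
      else PySem.Chars.splitOn.go sep ((c :: rest).length) rest (c :: []) []) from rfl]
  simp only [hpre, if_true]
  rw [pvSplitOn_go_spec sep hsep (List.drop sep.length (c :: rest)).length _ le_rfl
      ((c :: rest).length) (by have := List.length_pos_iff.mpr hsep; simp [List.length_drop]; omega) [] _]
  simp [pvMapFirst_nil_pre]

theorem pvSplitOn_cons_not_prefix (sep : List Char) (hsep : sep ≠ []) (c : Char) (rest : List Char)
    (hpre : sep.isPrefixOf (c :: rest) = false) :
    PySem.Chars.splitOn (c :: rest) sep = pvMapFirst [c] (PySem.Chars.splitOn rest sep) := by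
  rw [show PySem.Chars.splitOn (c :: rest) sep
      = PySem.Chars.splitOn.go sep ((c :: rest).length + 1) (c :: rest) [] [] from rfl]
  rw [show PySem.Chars.splitOn.go sep ((c :: rest).length + 1) (c :: rest) [] [] =
      (if sep.isPrefixOf (c :: rest) then
        PySem.Chars.splitOn.go sep ((c :: rest).length) (List.drop sep.length (c :: rest)) [] ([].reverse :: [])
      else PySem.Chars.splitOn.go sep ((c :: rest).length) rest (c :: []) []) from rfl]
  simp only [hpre, Bool.false_eq_true, if_false]
  rw [pvSplitOn_go_spec sep hsep rest.length rest le_rfl ((c :: rest).length) (by simp) [c] []]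
  simp

theorem pvFindGo_shift (sub : List Char) :
    ∀ (l : List Char) (k : Nat), PySem.Chars.find.go sub l k
      = if PySem.Chars.find l sub = -1 then -1 else (k : Int) + PySem.Chars.find l sub := by
  intro l
  induction l with
  | nil =>
    intro k
    by_cases he : sub.isEmpty <;> simp [PySem.Chars.find.go, PySem.Chars.find, he]
  | cons c rest ih =>
    intro k
    rw [show PySem.Chars.find.go sub (c :: rest) k
        = (if sub.isPrefixOf (c :: rest) then (k : Int) else PySem.Chars.find.go sub rest (k+1)) from rfl]
    rw [show PySem.Chars.find (c :: rest) sub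
        = (if sub.isPrefixOf (c :: rest) then (0 : Int) else PySem.Chars.find.go sub rest 1) from rfl]
    by_cases hpre : sub.isPrefixOf (c :: rest)
    · simp [hpre]
    · simp only [hpre, Bool.false_eq_true, if_false]
      rw [ih (k+1), ih 1]
      have hb := PySem.Chars.neg_one_le_find rest sub
      by_cases hf : PySem.Chars.find rest sub = -1
      · simp [hf]
      · have : ¬ (1 + PySem.Chars.find rest sub = -1) := by omega
        simp only [hf, if_false]
        split_ifs with h2
        · exact absurd h2 this
        · push_cast; ring

theorem pvFind_cons_not_prefix (sub : List Char) (c : Char) (rest : List Char)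
    (hpre : sub.isPrefixOf (c :: rest) = false) :
    PySem.Chars.find (c :: rest) sub
      = if PySem.Chars.find rest sub = -1 then -1 else 1 + PySem.Chars.find rest sub := by
  rw [show PySem.Chars.find (c :: rest) sub
      = (if sub.isPrefixOf (c :: rest) then (0 : Int) else PySem.Chars.find.go sub rest 1) from rfl]
  simp only [hpre, Bool.false_eq_true, if_false]
  exact pvFindGo_shift sub rest 1

theorem pvFind_cons_prefix (sub : List Char) (c : Char) (rest : List Char)
    (hpre : sub.isPrefixOf (c :: rest) = true) :
    PySem.Chars.find (c :: rest) sub = 0 := by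
  rw [show PySem.Chars.find (c :: rest) sub
      = (if sub.isPrefixOf (c :: rest) then (0 : Int) else PySem.Chars.find.go sub rest 1) from rfl]
  simp [hpre]

theorem pvFind_nil_of_ne (sub : List Char) (hsub : sub ≠ []) :
    PySem.Chars.find [] sub = -1 := by
  simp [PySem.Chars.find, PySem.Chars.find.go, List.isEmpty_iff, hsub]

theorem pvSplitOn_no_occ (sep : List Char) (hsep : sep ≠ []) :
    ∀ l, PySem.Chars.find l sep = -1 → PySem.Chars.splitOn l sep = [l] := by
  intro l
  induction l with
  | nil => intro _; exact pvSplitOn_nil sep hsep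
  | cons c rest ih =>
    intro hf
    have hpre : sep.isPrefixOf (c :: rest) = false := by
      by_contra h
      have : sep.isPrefixOf (c :: rest) = true := by simpa using h
      rw [pvFind_cons_prefix sep c rest this] at hf
      omega
    rw [pvSplitOn_cons_not_prefix sep hsep c rest hpre]
    rw [pvFind_cons_not_prefix sep c rest hpre] at hf
    have hrest : PySem.Chars.find rest sep = -1 := by
      by_cases h : PySem.Chars.find rest sep = -1
      · exact h
      · simp [h] at hf
        have := PySem.Chars.neg_one_le_find rest sep
        omega
    rw [ih hrest]
    simp [pvMapFirst]

theorem pvSplitOn_occ (sep : List Char) (hsep : sep ≠ []) :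
    ∀ l, PySem.Chars.find l sep ≠ -1 →
      PySem.Chars.splitOn l sep
        = l.take (PySem.Chars.find l sep).toNat
            :: PySem.Chars.splitOn (l.drop ((PySem.Chars.find l sep).toNat + sep.length)) sep := by
  intro l
  induction l with
  | nil => intro h; exact absurd (pvFind_nil_of_ne sep hsep) h
  | cons c rest ih =>
    intro hf
    by_cases hpre : sep.isPrefixOf (c :: rest)
    · rw [pvFind_cons_prefix sep c rest hpre]
      simp only [Int.toNat_zero, List.take_zero, Nat.zero_add]
      exact pvSplitOn_cons_prefix sep hsep c rest hpre
    · have hpre' : sep.isPrefixOf (c :: rest) = false := eq_false_of_ne_true hpre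
      rw [pvFind_cons_not_prefix sep c rest hpre'] at hf ⊢
      have hr : PySem.Chars.find rest sep ≠ -1 := by
        intro h; simp [h] at hf
      simp only [hr, if_false]
      have hr0 : 0 ≤ PySem.Chars.find rest sep := by
        have := PySem.Chars.neg_one_le_find rest sep; omega
      rw [pvSplitOn_cons_not_prefix sep hsep c rest hpre', ih hr]
      simp only [pvMapFirst]
      congr 1
      · rw [show (1 + PySem.Chars.find rest sep).toNat = (PySem.Chars.find rest sep).toNat + 1 by omega]
        simp
      · rw [show ((1 + PySem.Chars.find rest sep).toNat + sep.length)
            = ((PySem.Chars.find rest sep).toNat + sep.length) + 1 by omega]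
        simp

theorem pvSplitOn_ne_nil (sep : List Char) (hsep : sep ≠ []) (l : List Char) :
    PySem.Chars.splitOn l sep ≠ [] := by
  by_cases h : PySem.Chars.find l sep = -1
  · rw [pvSplitOn_no_occ sep hsep l h]; simp
  · rw [pvSplitOn_occ sep hsep l h]; simp


theorem pvFoldl_splice (splice : List Char) :
    ∀ (ys : List (List Char)) (x : List Char),
      ys.foldl (fun acc c => acc ++ (splice ++ c)) x
        = x ++ ys.foldl (fun acc c => acc ++ (splice ++ c)) [] := by
  intro ys
  induction ys with
  | nil => intro x; simp
  | cons y t ih =>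
    intro x
    simp only [List.foldl_cons]
    rw [ih (x ++ (splice ++ y)), ih ([] ++ (splice ++ y))]
    simp

theorem pvSpliceBGo_ne_nil (sub splice : List Char) (hsub : sub ≠ []) (rem : List Char) :
    pvSpliceBGo sub splice hsub rem ≠ [] := by
  rw [pvSpliceBGo]
  by_cases h : PySem.Chars.find rem sub = -1 <;> simp [h]

theorem pvMain (sub splice : List Char) (hsub : sub ≠ []) :
    ∀ n rem, rem.length ≤ n →
      (match PySem.Chars.splitOn rem sub with
        | [] => []
        | c0 :: rest => rest.foldl (fun acc c => acc ++ (splice ++ c)) c0)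
        = PySem.Chars.join [] (pvSpliceBGo sub splice hsub rem) := by
  intro n
  induction n with
  | zero =>
    intro rem hl
    have : rem = [] := List.length_eq_zero_iff.mp (Nat.le_zero.mp hl)
    subst this
    rw [pvSplitOn_nil sub hsub, pvSpliceBGo]
    simp [pvFind_nil_of_ne sub hsub, PySem.Chars.join_singleton]
  | succ n ih =>
    intro rem hl
    by_cases h : PySem.Chars.find rem sub = -1
    · rw [pvSplitOn_no_occ sub hsub rem h, pvSpliceBGo]
      simp [h, PySem.Chars.join_singleton]
    · have hj0 : 0 ≤ PySem.Chars.find rem sub := by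
        have := PySem.Chars.neg_one_le_find rem sub; omega
      rw [pvSplitOn_occ sub hsub rem h]
      rw [pvSpliceBGo]
      simp only [h, dif_neg, not_false_iff]
      set j := (PySem.Chars.find rem sub).toNat with hjdef
      set drem := rem.drop (j + sub.length) with hdrem
      -- length bound for IH
      have hrl : rem.length ≠ 0 := by
        intro h0
        have : rem = [] := List.length_eq_zero_iff.mp h0
        exact h (this ▸ pvFind_nil_of_ne sub hsub)
      have hsl : 0 < sub.length := List.length_pos_iff.mpr hsub
      have hdl : drem.length ≤ n := by
        rw [hdrem]; simp only [List.length_drop]; omega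
      -- A side: splitOn drem is nonempty
      obtain ⟨d0, drest, hsplit⟩ : ∃ d0 drest, PySem.Chars.splitOn drem sub = d0 :: drest := by
        cases hs : PySem.Chars.splitOn drem sub with
        | nil => exact absurd hs (pvSplitOn_ne_nil sub hsub drem)
        | cons a t => exact ⟨a, t, rfl⟩
      rw [hsplit]
      simp only [List.foldl_cons]
      rw [pvFoldl_splice splice drest (rem.take j ++ (splice ++ d0))]
      -- B side: go drem is nonempty
      obtain ⟨b0, brest, hgo⟩ : ∃ b0 brest, pvSpliceBGo sub splice hsub drem = b0 :: brest := by
        cases hg : pvSpliceBGo sub splice hsub drem with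
        | nil => exact absurd hg (pvSpliceBGo_ne_nil sub splice hsub drem)
        | cons a t => exact ⟨a, t, rfl⟩
      rw [hgo, PySem.Chars.join_cons_cons, PySem.Chars.join_cons_cons]
      have hbj : PySem.Chars.join [] (b0 :: brest)
          = PySem.Chars.join [] (pvSpliceBGo sub splice hsub drem) := by rw [hgo]
      have hih := ih drem hdl
      rw [hsplit] at hih
      simp only [List.foldl_cons] at hih
      rw [pvFoldl_splice splice drest d0] at hih
      rw [← hbj] at hih
      -- hih : d0 ++ fold drest = join [] (b0::brest)
      simp only [List.append_nil] at hih ⊢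
      rw [← hih]
      simp



theorem pvPorts_eq (base sub add : List Char) (after : Bool)
    (hpre : PySem.Chars.len (PySem.Chars.strip sub) ≠ 0) :
    pvSpliceA base sub add after = pvSpliceB base sub add after := by
  have hsub : sub ≠ [] := by
    intro hnil
    exact hpre (by simp [hnil, PySem.Chars.strip, PySem.Chars.lstrip, PySem.Chars.rstrip, PySem.Chars.len])
  rw [pvSpliceA, pvSpliceB, if_neg hpre, dif_neg hpre]
  have hsplit : PySem.Chars.split? base sub = some (PySem.Chars.splitOn base sub) := by
    simp [PySem.Chars.split?, List.isEmpty_iff, hsub]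
  rw [hsplit]
  exact pvMain sub (if after then sub ++ add else add ++ sub) hsub base.length base le_rfl

-- ===== VERDICT (by name: the statement is the Claim_ definition above) =====
theorem splice_string_all_spec : Claim_equal_splice_string_all := by
  intro base_string substring addition after _ hpre
  unfold Spec_splice_string_all splice_string_all splice_string_all_alt
  rw [pvPorts_eq _ _ _ _ hpre]
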